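-- pv_equiv track=rewrite | github.com/johnbrumley/prime_directives | alexa_story.py | chopTweetToLength
-- ===== SOURCE A (Python) =====
-- def chopTweetToLength(tweet, maxLength):
--     tweetList = []
--     if len(tweet) > maxLength:
--         c = tweet[maxLength]
--         newBreak = maxLength
--         while not c.isspace():
--             newBreak -= 1
--             c = tweet[newBreak]
--
--         tweetList.append(tweet[:newBreak])
--         # split the remaining part of the tweet
--         tweetList.extend(chopTweetToLength(tweet[newBreak:], maxLength))
--         return tweetList
--     else:
--         tweetList.append(tweet)
--         return tweetList
-- ===== SOURCE B (Python) =====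
-- def chopTweetToLength(tweet, maxLength):
--     # Precompute all whitespace positions once, then walk integer cut points over
--     # the ORIGINAL string: each cut is the largest whitespace index within the
--     # current window, so no per-chunk backward character scan and no recursion.
--     ws = [i for i, ch in enumerate(tweet) if ch.isspace()]
--     chunks = []
--     start = 0
--     while len(tweet) - start > maxLength:
--         cut = max(w for w in ws if w <= start + maxLength)
--         chunks.append(tweet[start:cut])
--         start = cut
--     chunks.append(tweet[start:])
--     return chunks
-- ===== Notes on version B (the rewrite author's own statement) =====
-- stated objective: alternative
-- what changed: B precomputes the list of whitespace positions once and iterates integer cut points over the original string, picking each cut as the maximum whitespace index within the window, instead of A's per-chunk backward character scan with recursive slicing and extend.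
-- outside the precondition, e.g. on chopTweetToLength('abc d', 2): A returns ['abc', ' d'], B raises ValueError; on chopTweetToLength('ab cd', 1): A does not finish within the time limit, B raises ValueError; on chopTweetToLength('abcd', 2): A raises IndexError, B raises ValueError
import Mathlib
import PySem

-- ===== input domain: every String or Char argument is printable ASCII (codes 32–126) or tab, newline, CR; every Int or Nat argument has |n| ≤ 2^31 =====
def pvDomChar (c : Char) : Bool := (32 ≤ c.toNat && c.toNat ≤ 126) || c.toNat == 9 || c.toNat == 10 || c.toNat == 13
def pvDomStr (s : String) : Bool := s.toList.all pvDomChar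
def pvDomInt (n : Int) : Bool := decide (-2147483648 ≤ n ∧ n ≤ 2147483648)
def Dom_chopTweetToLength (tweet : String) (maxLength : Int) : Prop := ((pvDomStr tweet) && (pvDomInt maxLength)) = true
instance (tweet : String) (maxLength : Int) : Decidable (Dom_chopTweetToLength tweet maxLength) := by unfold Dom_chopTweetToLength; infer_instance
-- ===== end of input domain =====

-- B precomputes the whitespace positions once and walks integer cut points over the
-- original string (each cut = the largest whitespace index in the window), replacing A's
-- per-chunk backward character scan, slicing recursion and extend; objective: alternative.

-- ===== PORT A =====
-- A's inner `while not c.isspace()` scan: reads tweet[newBreak] (Python indexing, pyGet?),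
-- decrements until a space; none = IndexError (outside Pre_); fuel only makes it total.
def pvScanBreak (t : List Char) : Nat → Int → Option Int
  | 0, _ => none
  | f + 1, nb =>
    match PySem.List.pyGet? t nb with
    | none => none
    | some c => if PySem.Chars.isspace c then some nb else pvScanBreak t f (nb - 1)

-- A's recursion; fuel bounds the recursion depth (exhaustion is unreachable under Pre_),
-- `none` from the scan = IndexError (outside Pre_).
def pvChopRecA (m : Int) : Nat → List Char → List (List Char)
  | 0, _ => []
  | f + 1, t =>
    if (t.length : Int) > m then
      match pvScanBreak t (m.toNat + t.length + 1) m with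
      | none => []
      | some nb =>
        PySem.List.slice t none (some nb) :: pvChopRecA m f (PySem.List.slice t (some nb) none)
    else [t]

def chopTweetToLength (tweet : String) (maxLength : Int) : List String :=
  (pvChopRecA maxLength (tweet.toList.length + 1) tweet.toList).map String.ofList

-- ===== PORT B =====
-- ws = [i for i, ch in enumerate(tweet) if ch.isspace()]
def pvWsIdx (t : List Char) : List Int :=
  ((PySem.List.enumerate t).filter (fun p => PySem.Chars.isspace p.2)).map (·.1)

-- B's `while len(tweet) - start > maxLength` loop: start walks cut points over the
-- original string; `max(w for w in ws if w <= start+maxLength)` is max? of the filter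
-- (none = ValueError on an empty generator, outside Pre_); fuel only makes it total.
def pvChopLoopB (t : List Char) (ws : List Int) (m : Int) : Nat → Int → List (List Char) → List (List Char)
  | 0, _, acc => acc
  | f + 1, start, acc =>
    if (t.length : Int) - start > m then
      match PySem.List.max? (ws.filter (fun w => w ≤ start + m)) (fun x => x) with
      | none => acc
      | some cut =>
        pvChopLoopB t ws m f cut (acc ++ [PySem.List.slice t (some start) (some cut)])
    else acc ++ [PySem.List.slice t (some start) none]

def chopTweetToLength_alt (tweet : String) (maxLength : Int) : List String :=
  (pvChopLoopB tweet.toList (pvWsIdx tweet.toList) maxLength (tweet.toList.length + 1) 0 []).map String.ofList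

-- ===== PRECONDITION & SPEC =====
-- Pre_ excludes the inputs on which some chunk has no whitespace among its first
-- maxLength+1 characters (including every splitting input with maxLength ≤ 0): there the
-- backward scan leaves the window, and A raises IndexError or recurses without progress
-- (RecursionError), or — when the negative-index wraparound happens to hit a space —
-- returns accidental over-long chunks, which no one would specify.
def Pre_chopTweetToLength (tweet : String) (maxLength : Int) : Prop :=
  ((tweet.toList.length : Int) ≤ maxLength) ∨
  (1 ≤ maxLength ∧
    ∀ i : Nat, ∀ _ : i < tweet.toList.length,
      (i = 0 ∨ PySem.Chars.isspace (tweet.toList.get ⟨i, by assumption⟩)) →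
      (i : Int) + maxLength < tweet.toList.length →
      ∃ j : Nat, ∃ _ : j < tweet.toList.length,
        i < j ∧ (j : Int) ≤ (i : Int) + maxLength ∧
        PySem.Chars.isspace (tweet.toList.get ⟨j, by assumption⟩))

instance (tweet : String) (maxLength : Int) : Decidable (Pre_chopTweetToLength tweet maxLength) := by
  unfold Pre_chopTweetToLength; infer_instance

def pvWitness_chopTweetToLength : String × Int := ("hello to the world", 7)

def Spec_chopTweetToLength (tweet : String) (maxLength : Int) (out : List String) : Prop := out = chopTweetToLength_alt tweet maxLength
instance (tweet : String) (maxLength : Int) (out : List String) : Decidable (Spec_chopTweetToLength tweet maxLength out) := by unfold Spec_chopTweetToLength; infer_instance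

-- ===== CLAIM (what is proved, stated in full; the proofs are below) =====
def Claim_equal_chopTweetToLength : Prop := ∀ (tweet : String) (maxLength : Int), Dom_chopTweetToLength tweet maxLength → Pre_chopTweetToLength tweet maxLength → Spec_chopTweetToLength tweet maxLength (chopTweetToLength tweet maxLength)

-- ===== LEMMAS AND PROOFS =====

-- membership in B's whitespace-index list: exactly the valid whitespace positions
theorem pv_mem_wsAux (t : List Char) (s w : Int) :
    w ∈ ((PySem.List.enumerate t s).filter (fun p => PySem.Chars.isspace p.2)).map (·.1) ↔
      ∃ j : Nat, ∃ h : j < t.length, w = s + j ∧ PySem.Chars.isspace (t.get ⟨j, h⟩) := by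
  induction t generalizing s with
  | nil => simp [PySem.List.enumerate]
  | cons x xs ih =>
    rw [PySem.List.enumerate_cons]
    by_cases hx : PySem.Chars.isspace x
    · simp only [List.filter_cons, hx, if_pos, List.map_cons, List.mem_cons, ih]
      constructor
      · rintro (rfl | ⟨j, hj, rfl, hws⟩)
        · exact ⟨0, by simp, by simp, by simpa using hx⟩
        · exact ⟨j + 1, by simp only [List.length_cons]; omega, by push_cast; ring_nf, by simpa using hws⟩
      · rintro ⟨j, hj, rfl, hws⟩
        cases j with
        | zero => left; simp
        | succ j =>
          right
          exact ⟨j, by simp only [List.length_cons] at hj; omega, by push_cast; ring_nf, by simpa using hws⟩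
    · simp only [List.filter_cons, hx, if_neg, Bool.false_eq_true, not_false_iff, ih]
      constructor
      · rintro ⟨j, hj, rfl, hws⟩
        exact ⟨j + 1, by simp only [List.length_cons]; omega, by push_cast; ring_nf, by simpa using hws⟩
      · rintro ⟨j, hj, rfl, hws⟩
        cases j with
        | zero => exact absurd (by simpa using hws) hx
        | succ j =>
          exact ⟨j, by simp only [List.length_cons] at hj; omega, by push_cast; ring_nf, by simpa using hws⟩

theorem pv_mem_wsIdx (t : List Char) (w : Int) :
    w ∈ pvWsIdx t ↔ ∃ j : Nat, ∃ h : j < t.length, w = j ∧ PySem.Chars.isspace (t.get ⟨j, h⟩) := by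
  unfold pvWsIdx
  rw [pv_mem_wsAux]
  simp

-- A's backward scan returns the greatest whitespace index ≤ nb (when one exists at all)
theorem pv_scan_spec (s : List Char) :
    ∀ (fuel : Nat) (nb : Int), 0 ≤ nb → nb < s.length → nb.toNat < fuel →
    (∃ j : Nat, ∃ h : j < s.length, (j : Int) ≤ nb ∧ PySem.Chars.isspace (s.get ⟨j, h⟩)) →
    ∃ r : Nat, ∃ hr : r < s.length,
      pvScanBreak s fuel nb = some ((r : Nat) : Int) ∧ (r : Int) ≤ nb ∧
      PySem.Chars.isspace (s.get ⟨r, hr⟩) ∧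
      (∀ j : Nat, ∀ h : j < s.length, (j : Int) ≤ nb → PySem.Chars.isspace (s.get ⟨j, h⟩) → j ≤ r) := by
  intro fuel
  induction fuel with
  | zero => intro nb _ _ h; omega
  | succ f ih =>
    intro nb h0 hlt hfuel hex
    have hidx : nb.toNat < s.length := by omega
    have hget : PySem.List.pyGet? s nb = some (s.get ⟨nb.toNat, hidx⟩) := by
      have h1 := PySem.List.pyGet?_natCast s nb.toNat
      rw [Int.toNat_of_nonneg h0] at h1
      rw [h1, List.getElem?_eq_getElem hidx]
      simp [List.get_eq_getElem]
    by_cases hws : PySem.Chars.isspace (s.get ⟨nb.toNat, hidx⟩)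
    · refine ⟨nb.toNat, hidx, ?_, by omega, hws, fun j h hj _ => by omega⟩
      simp only [pvScanBreak, hget]
      rw [if_pos (by simpa [List.get_eq_getElem] using hws)]
      simp only [Option.some.injEq]
      omega
    · -- current char not whitespace: some strictly smaller candidate exists
      obtain ⟨j, hj, hjle, hjws⟩ := hex
      have hjne : j ≠ nb.toNat := fun he => hws (he ▸ hjws)
      have hjlt : (j : Int) ≤ nb - 1 := by omega
      obtain ⟨r, hr, heq, hrle, hrws, hmax⟩ :=
        ih (nb - 1) (by omega) (by omega) (by omega) ⟨j, hj, hjlt, hjws⟩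
      refine ⟨r, hr, ?_, by omega, hrws, ?_⟩
      · simp only [pvScanBreak, hget]
        rw [if_neg (by simpa [List.get_eq_getElem] using hws)]
        exact heq
      · intro j' h' hj' hws'
        have : j' ≠ nb.toNat := fun he => hws (he ▸ hws')
        exact hmax j' h' (by omega) hws'

-- the window property of Pre_ (second branch), restated on the char list
def pvWindow (t : List Char) (m : Int) : Prop :=
  ∀ i : Nat, ∀ _ : i < t.length,
    (i = 0 ∨ PySem.Chars.isspace (t.get ⟨i, by assumption⟩)) →
    (i : Int) + m < t.length →
    ∃ j : Nat, ∃ _ : j < t.length,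
      i < j ∧ (j : Int) ≤ (i : Int) + m ∧ PySem.Chars.isspace (t.get ⟨j, by assumption⟩)

-- main loop correspondence: B's accumulator walk at absolute position k equals acc ++
-- A's recursion on the suffix t.drop k
theorem pv_loop_eq (t : List Char) (m : Int) (hm : 1 ≤ m) (hP : pvWindow t m) :
    ∀ fA : Nat, ∀ k : Nat, ∀ fB : Nat, ∀ acc : List (List Char),
      k ≤ t.length →
      (k = 0 ∨ ∃ h : k < t.length, PySem.Chars.isspace (t.get ⟨k, h⟩)) →
      t.length - k < fA → t.length - k < fB →
      pvChopLoopB t (pvWsIdx t) m fB (k : Int) acc = acc ++ pvChopRecA m fA (t.drop k) := by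
  intro fA
  induction fA with
  | zero => intro k fB acc _ _ h; omega
  | succ fA ih =>
    intro k fB acc hk hstate hfA hfB
    obtain ⟨fB, rfl⟩ : ∃ fB', fB = fB' + 1 := ⟨fB - 1, by omega⟩
    have hlen : ((t.drop k).length : Int) = (t.length : Int) - k := by
      simp [List.length_drop]; omega
    by_cases hcond : (t.length : Int) - (k : Int) > m
    · -- splitting step
      have hkm : (k : Int) + m < t.length := by omega
      have hklt : k < t.length := by omega
      -- Pre_'s window property at i = k gives an absolute candidate w0 ∈ (k, k+m]
      obtain ⟨w0, hw0lt, hw0gt, hw0le, hw0ws⟩ :=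
        hP k hklt (hstate.imp id (fun ⟨_, h⟩ => h)) hkm
      -- A's scan on the suffix s = t.drop k
      have hsget : ∀ (j : Nat) (h : j < (t.drop k).length),
          (t.drop k).get ⟨j, h⟩ = t.get ⟨k + j, by simp [List.length_drop] at h; omega⟩ := by
        intro j h
        simp [List.getElem_drop]
      obtain ⟨r, hr, heq, hrle, hrws, hmax⟩ :=
        pv_scan_spec (t.drop k) (m.toNat + (t.drop k).length + 1) m (by omega) (by omega)
          (by omega)
          ⟨w0 - k, by simp [List.length_drop]; omega, by omega, by
            rw [hsget]
            have : k + (w0 - k) = w0 := by omega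
            simp only [this]
            exact hw0ws⟩
      -- B's max over the filtered whitespace list
      have hkr_mem : ((k + r : Nat) : Int) ∈ (pvWsIdx t).filter (fun w => w ≤ (k : Int) + m) := by
        rw [List.mem_filter]
        constructor
        · rw [pv_mem_wsIdx]
          refine ⟨k + r, by simp [List.length_drop] at hr; omega, rfl, ?_⟩
          have := hrws
          rw [hsget] at this
          exact this
        · simp only [decide_eq_true_eq]
          push_cast; omega
      have hne : (pvWsIdx t).filter (fun w => w ≤ (k : Int) + m) ≠ [] :=
        fun h => by simp [h] at hkr_mem
      obtain ⟨c, hc⟩ : ∃ c, PySem.List.max? ((pvWsIdx t).filter (fun w => w ≤ (k : Int) + m)) (fun x => x) = some c := by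
        cases hmx : PySem.List.max? ((pvWsIdx t).filter (fun w => w ≤ (k : Int) + m)) (fun x => x) with
        | none => exact absurd ((PySem.List.max?_eq_none_iff _ _).1 hmx) hne
        | some c => exact ⟨c, rfl⟩
      have hc_mem := PySem.List.max?_mem hc
      have hc_max := PySem.List.max?_isMax hc
      rw [List.mem_filter] at hc_mem
      obtain ⟨hc_ws, hc_le⟩ := hc_mem
      simp only [decide_eq_true_eq] at hc_le
      rw [pv_mem_wsIdx] at hc_ws
      obtain ⟨jc, hjc, rfl, hjcws⟩ := hc_ws
      -- c ≥ k
      have hcge : k ≤ jc := by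
        rcases hstate with rfl | ⟨hklt', hkws⟩
        · omega
        · have : ((k : Nat) : Int) ∈ (pvWsIdx t).filter (fun w => w ≤ (k : Int) + m) := by
            rw [List.mem_filter]
            refine ⟨(pv_mem_wsIdx t _).2 ⟨k, hklt', rfl, hkws⟩, by simp; omega⟩
          have := hc_max _ this
          simp only at this
          omega
      -- c = k + r by mutual maximality
      have hceq : jc = k + r := by
        have h1 : jc ≤ k + r := by
          -- jc - k is a relative whitespace candidate ≤ m, so jc - k ≤ r
          have hrel : jc - k ≤ r := by
            refine hmax (jc - k) (by simp [List.length_drop]; omega) (by omega) ?_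
            rw [hsget]
            have : k + (jc - k) = jc := by omega
            simp only [this]
            exact hjcws
          omega
        have h2 : k + r ≤ jc := by
          have := hc_max _ hkr_mem
          simp only at this
          exact_mod_cast by push_cast at this ⊢; omega
        omega
      -- progress: r ≥ 1
      have hr1 : 1 ≤ r := by
        have : w0 - k ≤ r := by
          refine hmax (w0 - k) (by simp [List.length_drop]; omega) (by omega) ?_
          rw [hsget]
          have : k + (w0 - k) = w0 := by omega
          simp only [this]
          exact hw0ws
        omega
      -- unfold both programs one step
      rw [pvChopLoopB, pvChopRecA]
      rw [if_pos (by omega : (t.length : Int) - (k : Int) > m),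
          if_pos (by rw [hlen]; omega : ((t.drop k).length : Int) > m)]
      rw [hc, heq]
      dsimp only
      subst hceq
      -- chunks agree
      have hchunk : PySem.List.slice t (some ((k : Nat) : Int)) (some ((k + r : Nat) : Int)) =
          PySem.List.slice (t.drop k) none (some ((r : Nat) : Int)) := by
        rw [PySem.List.slice_to _ (by positivity),
            show (((k + r : Nat) : Int)) = ((k : Nat) : Int) + ((r : Nat) : Int) by push_cast; ring,
            PySem.List.slice_natCast_add]
        simp
      -- suffixes agree
      have hsuff : PySem.List.slice (t.drop k) (some ((r : Nat) : Int)) none = t.drop (k + r) := by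
        rw [PySem.List.slice_from_natCast, List.drop_drop]
      rw [ih (k + r) fB (acc ++ [PySem.List.slice t (some ((k : Nat) : Int)) (some ((k + r : Nat) : Int))])
            (by simp [List.length_drop] at hr; omega)
            (Or.inr ⟨by simp [List.length_drop] at hr; omega, by
              have := hrws
              rw [hsget] at this
              exact this⟩)
            (by omega) (by omega)]
      rw [hchunk, hsuff]
      simp
    · -- final chunk
      rw [pvChopLoopB, pvChopRecA]
      rw [if_neg (by omega : ¬ ((t.length : Int) - (k : Int) > m)),
          if_neg (by rw [hlen]; omega : ¬ (((t.drop k).length : Int) > m))]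
      rw [PySem.List.slice_from_natCast]

-- ===== VERDICT (by name: the statement is the Claim_ definition above) =====
theorem chopTweetToLength_spec : Claim_equal_chopTweetToLength := by
  intro tweet maxLength _ hpre
  unfold Spec_chopTweetToLength chopTweetToLength chopTweetToLength_alt
  rcases hpre with hshort | ⟨hm, hP⟩
  · -- len ≤ maxLength: both emit the single chunk immediately
    rw [pvChopRecA, pvChopLoopB]
    rw [if_neg (by omega), if_neg (by omega)]
    simp [PySem.List.slice_some_none, PySem.List.clampIdx]
  · have := pv_loop_eq tweet.toList maxLength hm hP (tweet.toList.length + 1) 0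
      (tweet.toList.length + 1) [] (by omega) (Or.inl rfl) (by omega) (by omega)
    rw [show ((0 : Nat) : Int) = (0 : Int) by simp] at this
    rw [this]
    simp
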